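-- pv_equiv track=rewrite | github.com/taggedzi/Repo-Interrogator | src/repo_mcp/adapters/rust.py | _line_depths
-- ===== SOURCE A (Python) =====
-- def _line_depths(masked_text: str) -> list[int]:
--     depths: list[int] = []
--     depth = 0
--     for line in masked_text.splitlines():
--         depths.append(depth)
--         for char in line:
--             if char == "{":
--                 depth += 1
--             elif char == "}":
--                 depth = max(0, depth - 1)
--     return depths
-- ===== SOURCE B (Python) =====
-- def _line_depths(masked_text: str) -> list[int]:
--     # Per-line closed-form transfer: net brace balance s and minimum prefix
--     # balance lo; the clamped depth after a line is max(d + s, s - lo).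
--     def transfer(line):
--         s = 0
--         lo = 0
--         for ch in line:
--             if ch == "{":
--                 s += 1
--             elif ch == "}":
--                 s -= 1
--             if s < lo:
--                 lo = s
--         return s, lo
--     out = []
--     d = 0
--     for s, lo in [transfer(line) for line in masked_text.splitlines()]:
--         out.append(d)
--         d = max(d + s, s - lo)
--     return out
-- ===== Notes on version B (the rewrite author's own statement) =====
-- stated objective: alternative
-- what changed: Instead of mutating one clamped depth counter character by character across all lines, B computes for each line a closed-form transfer (net brace balance s, minimum prefix balance lo) and accumulates depths via depth' = max(depth + s, s - lo).
import Mathlib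
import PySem

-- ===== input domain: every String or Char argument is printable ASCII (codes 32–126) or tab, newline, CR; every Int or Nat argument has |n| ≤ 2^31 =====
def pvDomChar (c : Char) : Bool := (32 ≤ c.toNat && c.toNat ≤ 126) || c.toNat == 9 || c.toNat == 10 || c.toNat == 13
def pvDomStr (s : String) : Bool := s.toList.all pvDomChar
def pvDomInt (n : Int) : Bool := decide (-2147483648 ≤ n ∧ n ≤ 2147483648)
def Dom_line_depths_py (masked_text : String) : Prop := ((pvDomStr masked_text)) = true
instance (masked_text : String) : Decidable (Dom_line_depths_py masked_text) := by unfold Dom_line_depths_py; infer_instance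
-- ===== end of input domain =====

-- B replaces A's character-by-character clamped depth update with a per-line
-- closed-form transfer (net brace balance and minimum prefix balance), then
-- accumulates depths over the precomputed transfers (alternative algorithm).


-- ===== PORT A =====
-- one character step of A's inner loop
def pvStepA (d : Int) (c : Char) : Int :=
  if c = '{' then d + 1 else if c = '}' then max 0 (d - 1) else d

def line_depths_py (masked_text : String) : List Int :=
  ((PySem.Str.splitlines masked_text).foldl
    (fun (st : List Int × Int) line =>
      (st.1 ++ [st.2], line.toList.foldl pvStepA st.2))
    ([], 0)).1

-- ===== PORT B =====
-- one character step of B's inner loop: updates (s, lo)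
def pvStepB (p : Int × Int) (c : Char) : Int × Int :=
  let s := if c = '{' then p.1 + 1 else if c = '}' then p.1 - 1 else p.1
  (s, if s < p.2 then s else p.2)

-- B's transfer(line): net balance s and minimum prefix balance lo
def pvTransferB (line : String) : Int × Int :=
  line.toList.foldl pvStepB (0, 0)

def line_depths_py_alt (masked_text : String) : List Int :=
  (((PySem.Str.splitlines masked_text).map pvTransferB).foldl
    (fun (st : List Int × Int) t =>
      (st.1 ++ [st.2], max (st.2 + t.1) (t.1 - t.2)))
    ([], 0)).1

-- ===== PRECONDITION & SPEC =====
def Spec_line_depths_py (masked_text : String) (out : List Int) : Prop := out = line_depths_py_alt masked_text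
instance (masked_text : String) (out : List Int) : Decidable (Spec_line_depths_py masked_text out) := by unfold Spec_line_depths_py; infer_instance

-- ===== CLAIM (what is proved, stated in full; the proofs are below) =====
def Claim_equal_line_depths_py : Prop := ∀ (masked_text : String), Dom_line_depths_py masked_text → Spec_line_depths_py masked_text (line_depths_py masked_text)

-- ===== LEMMAS AND PROOFS =====

-- B's step preserves lo ≤ s and lo ≤ 0
theorem pvStepB_inv (p : Int × Int) (c : Char) (h1 : p.2 ≤ p.1) (h2 : p.2 ≤ 0) :
    (pvStepB p c).2 ≤ (pvStepB p c).1 ∧ (pvStepB p c).2 ≤ 0 := by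
  unfold pvStepB; dsimp only; split_ifs <;> constructor <;> omega

-- one step of A's clamped walk matches one step of B's (s, lo) state under the
-- closed-form reading max (d0 + s) (s - lo)
theorem pvStepA_eq (d0 : Int) (p : Int × Int) (c : Char)
    (h1 : p.2 ≤ p.1) :
    pvStepA (max (d0 + p.1) (p.1 - p.2)) c =
      max (d0 + (pvStepB p c).1) ((pvStepB p c).1 - (pvStepB p c).2) := by
  unfold pvStepA pvStepB; dsimp only; split_ifs <;> omega

-- key invariant: A's clamped walk over cs from depth max (d0 + s) (s - lo)
-- equals the closed form at B's final (s, lo) state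
theorem pv_line_key (cs : List Char) (d0 : Int) (p : Int × Int)
    (h1 : p.2 ≤ p.1) (h2 : p.2 ≤ 0) :
    cs.foldl pvStepA (max (d0 + p.1) (p.1 - p.2)) =
      max (d0 + (cs.foldl pvStepB p).1)
          ((cs.foldl pvStepB p).1 - (cs.foldl pvStepB p).2) := by
  induction cs generalizing p with
  | nil => rfl
  | cons c cs ih =>
    rw [List.foldl_cons, List.foldl_cons, pvStepA_eq d0 p c h1]
    obtain ⟨h1', h2'⟩ := pvStepB_inv p c h1 h2
    exact ih _ h1' h2'

-- the two outer folds agree on the depth list, for any nonnegative start depth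
theorem pv_outer (lines : List String) (acc : List Int) (d : Int) (hd : 0 ≤ d) :
    (lines.foldl
      (fun (st : List Int × Int) line =>
        (st.1 ++ [st.2], line.toList.foldl pvStepA st.2)) (acc, d)).1 =
    ((lines.map pvTransferB).foldl
      (fun (st : List Int × Int) t =>
        (st.1 ++ [st.2], max (st.2 + t.1) (t.1 - t.2))) (acc, d)).1 := by
  induction lines generalizing acc d with
  | nil => rfl
  | cons line lines ih =>
    simp only [List.map_cons, List.foldl_cons]
    have hkey := pv_line_key line.toList d (0, 0) (le_refl _) (le_refl _)
    simp only [add_zero, sub_zero] at hkey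
    rw [max_eq_left hd] at hkey
    rw [hkey]
    unfold pvTransferB
    obtain ⟨hs, hlo⟩ : (line.toList.foldl pvStepB (0, 0)).2 ≤ (line.toList.foldl pvStepB (0, 0)).1 ∧
        (line.toList.foldl pvStepB (0, 0)).2 ≤ 0 := by
      induction line.toList using List.reverseRecOn with
      | nil => exact ⟨le_refl _, le_refl _⟩
      | append_singleton cs c ihc =>
        rw [List.foldl_append, List.foldl_cons, List.foldl_nil]
        exact pvStepB_inv _ c ihc.1 ihc.2
    exact ih _ _ (by omega)

-- ===== VERDICT (by name: the statement is the Claim_ definition above) =====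
theorem line_depths_py_spec : Claim_equal_line_depths_py := by
  intro masked_text _
  unfold Spec_line_depths_py line_depths_py line_depths_py_alt
  exact pv_outer _ [] 0 (le_refl _)
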